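-- pv_equiv track=rewrite | github.com/devetloper/Algorithm | SWEA/SWEA Intermediate/Fail SWEA Intermediate 5110.py | put_in
-- ===== SOURCE A (Python) =====
-- def put_in(long_list, short_list):
--     short_min = min(short_list)
--     if short_min >= max(long_list):
--         long_list.extend(short_list)
--     else:
--         i= 0
--         while short_min>= long_list[i]:
--             i += 1
--         for num in short_list[::-1]:
--             long_list.insert(i,num)
--     return long_list
-- ===== SOURCE B (Python) =====
-- def put_in(long_list, short_list):
--     short_min = min(short_list)
--     out = []
--     placed = False
--     for v in long_list:
--         if not placed and v > short_min:
--             out.extend(short_list)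
--             placed = True
--         out.append(v)
--     if not placed:
--         out.extend(short_list)
--     long_list[:] = out
--     return long_list
-- ===== Notes on version B (the rewrite author's own statement) =====
-- stated objective: faster
-- what changed: B streams once over long_list emitting elements into a fresh output list and injects short_list inline at the first element exceeding its min (or at the end), instead of A's max() test plus while-index scan plus element-by-element insert of the reversed short list.
import Mathlib
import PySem

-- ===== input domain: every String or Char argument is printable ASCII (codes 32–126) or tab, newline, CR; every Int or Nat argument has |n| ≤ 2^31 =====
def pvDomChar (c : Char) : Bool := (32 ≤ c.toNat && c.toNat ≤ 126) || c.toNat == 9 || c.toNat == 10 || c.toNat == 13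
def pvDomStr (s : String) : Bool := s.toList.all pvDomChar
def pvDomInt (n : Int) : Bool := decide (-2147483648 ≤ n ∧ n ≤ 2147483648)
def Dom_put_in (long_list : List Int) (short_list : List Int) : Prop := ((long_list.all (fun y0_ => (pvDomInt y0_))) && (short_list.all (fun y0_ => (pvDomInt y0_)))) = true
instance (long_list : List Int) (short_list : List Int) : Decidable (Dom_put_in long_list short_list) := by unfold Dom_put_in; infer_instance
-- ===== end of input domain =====

-- B streams once over long_list into a fresh output list, injecting short_list inline at the first
-- element exceeding its min (or at the end), instead of A's max() test + while-index scan +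
-- element-by-element inserts of the reversed short list (objective: faster).
-- Both Pythons mutate long_list in place and return it; the equivalence proved here is about the
-- return value (B performs the same final mutation of long_list as A wherever A returns).

-- ===== PORT A =====
-- 'while short_min >= long_list[i]: i += 1' : walks long_list from index i; running off the end
-- (Python's IndexError) cannot happen on the branch where A calls it.
def putInScan (short_min : Int) : List Int → Nat → Nat
  | [], i => i
  | x :: xs, i => if short_min ≥ x then putInScan short_min xs (i + 1) else i

def put_in (long_list : List Int) (short_list : List Int) : List Int :=
  -- short_min = min(short_list); max(long_list): Python min/max raise on [], excluded by Pre_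
  match PySem.List.min? short_list (fun x => x), PySem.List.max? long_list (fun x => x) with
  | some short_min, some long_max =>
    if short_min ≥ long_max then
      long_list ++ short_list                      -- long_list.extend(short_list)
    else
      let i := putInScan short_min long_list 0
      -- for num in short_list[::-1]: long_list.insert(i, num)
      short_list.reverse.foldl (fun acc num => PySem.List.insert acc (i : Int) num) long_list
  | _, _ => long_list                              -- unreachable under Pre_ (min/max raise)

-- ===== PORT B =====
def put_in_alt (long_list : List Int) (short_list : List Int) : List Int :=
  match PySem.List.min? short_list (fun x => x) with
  | some short_min =>
    -- out = []; placed = False; for v in long_list: ...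
    let st := long_list.foldl
      (fun (p : List Int × Bool) v =>
        if !p.2 && decide (short_min < v) then (p.1 ++ short_list ++ [v], true)
        else (p.1 ++ [v], p.2))
      ([], false)
    -- if not placed: out.extend(short_list); long_list[:] = out; return long_list
    if st.2 then st.1 else st.1 ++ short_list
  | none => long_list                              -- unreachable under Pre_ (min raises)

-- ===== PRECONDITION & SPEC =====
-- Pre_ excludes exactly the inputs on which Python A raises: empty short_list (min([]) raises
-- ValueError) and empty long_list (max([]) raises ValueError).
def Pre_put_in (long_list : List Int) (short_list : List Int) : Prop :=
  long_list ≠ [] ∧ short_list ≠ []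
instance (long_list : List Int) (short_list : List Int) : Decidable (Pre_put_in long_list short_list) := by unfold Pre_put_in; infer_instance

def pvWitness_put_in : List Int × List Int := ([1, 5, 3], [2, 4])

def Spec_put_in (long_list : List Int) (short_list : List Int) (out : List Int) : Prop := out = put_in_alt long_list short_list
instance (long_list : List Int) (short_list : List Int) (out : List Int) : Decidable (Spec_put_in long_list short_list out) := by unfold Spec_put_in; infer_instance

-- ===== CLAIM (what is proved, stated in full; the proofs are below) =====
def Claim_equal_put_in : Prop := ∀ (long_list : List Int) (short_list : List Int), Dom_put_in long_list short_list → Pre_put_in long_list short_list → Spec_put_in long_list short_list (put_in long_list short_list)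

-- ===== LEMMAS AND PROOFS =====

-- Common reference value: short_list woven into long_list before its first element > m.
def pvWeave (m : Int) (sl : List Int) : List Int → List Int
  | [] => sl
  | x :: t => if m < x then sl ++ x :: t else x :: pvWeave m sl t

-- PySem.List.insert at a nonnegative (cast Nat) index is take/cons/drop (both clamp past the end).
theorem pv_insert_natCast (xs : List Int) (n : Nat) (v : Int) :
    PySem.List.insert xs (n : Int) v = xs.take n ++ v :: xs.drop n := by
  simp only [PySem.List.insert, PySem.List.sliceIndices]
  have h0 : ¬ ((n : Int) < 0) := by omega
  rw [if_neg h0, if_neg (show ¬ ((1 : Int) < 0) by norm_num)]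
  have h1 : ((min (n : Int) (xs.length : Int))).toNat = min n xs.length := by omega
  rw [h1]
  rcases le_total n xs.length with h | h
  · rw [min_eq_left h]
  · rw [min_eq_right h, List.take_length, List.take_of_length_le h,
      List.drop_length, List.drop_eq_nil_of_le h]

-- A's insertion loop over the reversed short list equals one splice at i.
theorem pv_fold_insert (sl ll : List Int) (i : Nat) (h : i ≤ ll.length) :
    sl.reverse.foldl (fun acc num => PySem.List.insert acc (i : Int) num) ll
      = ll.take i ++ sl ++ ll.drop i := by
  rw [List.foldl_reverse]
  induction sl with
  | nil => simp
  | cons a t ih =>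
    have hl : (List.take i ll).length = i := by rw [List.length_take]; omega
    rw [List.foldr_cons, ih, pv_insert_natCast, List.append_assoc,
      List.take_left' hl, List.drop_left' hl, List.append_assoc]
    rfl

-- The scan index is shift-invariant in its accumulator.
theorem pv_scan_shift (m : Int) (xs : List Int) (j : Nat) :
    putInScan m xs j = j + putInScan m xs 0 := by
  induction xs generalizing j with
  | nil => simp [putInScan]
  | cons x t ih =>
    by_cases hx : m ≥ x
    · simp only [putInScan, if_pos hx]
      rw [ih (j + 1), ih 1]; omega
    · simp [putInScan, hx]

-- When some element exceeds m, A's scan + reversed-insert loop computes the weave.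
theorem pv_A_weave (m : Int) (sl : List Int) (xs : List Int) (h : ∃ x ∈ xs, m < x) :
    sl.reverse.foldl (fun acc num => PySem.List.insert acc ((putInScan m xs 0 : Nat) : Int) num) xs
      = pvWeave m sl xs := by
  induction xs with
  | nil => simp at h
  | cons x t ih =>
    by_cases hx : m < x
    · have : putInScan m (x :: t) 0 = 0 := by simp [putInScan, not_le.mpr hx]
      rw [this, pv_fold_insert sl (x :: t) 0 (by simp)]
      simp [pvWeave, hx]
    · have hx' : m ≥ x := not_lt.mp hx
      have ht : ∃ y ∈ t, m < y := by
        rcases h with ⟨y, hy, hmy⟩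
        rcases List.mem_cons.mp hy with rfl | hyt
        · exact absurd hmy hx
        · exact ⟨y, hyt, hmy⟩
      have hk : putInScan m (x :: t) 0 = 1 + putInScan m t 0 := by
        simp only [putInScan, if_pos hx', Nat.zero_add]
        exact pv_scan_shift m t 1
      -- the scan stays within the list when an exceeding element exists
      have hkle : ∀ (ys : List Int), (∃ y ∈ ys, m < y) → putInScan m ys 0 ≤ ys.length := by
        intro ys
        induction ys with
        | nil => intro h'; simp at h'
        | cons z u ihz =>
          intro h'
          by_cases hz : m < z
          · simp [putInScan, not_le.mpr hz]
          · have hu : ∃ y ∈ u, m < y := by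
              rcases h' with ⟨y, hy, hmy⟩
              rcases List.mem_cons.mp hy with rfl | hyu
              · exact absurd hmy hz
              · exact ⟨y, hyu, hmy⟩
            have := ihz hu
            simp only [putInScan, if_pos (not_lt.mp hz), Nat.zero_add]
            rw [pv_scan_shift m u 1]
            simp [List.length_cons]; omega
      have hle : putInScan m t 0 ≤ t.length := hkle t ht
      rw [hk, pv_fold_insert sl (x :: t) (1 + putInScan m t 0) (by simp; omega)]
      have h1 : (x :: t).take (1 + putInScan m t 0) = x :: t.take (putInScan m t 0) := by
        rw [Nat.add_comm]; rfl
      have h2 : (x :: t).drop (1 + putInScan m t 0) = t.drop (putInScan m t 0) := by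
        rw [Nat.add_comm]; rfl
      rw [h1, h2]
      have := ih ht
      rw [pv_fold_insert sl t (putInScan m t 0) hle] at this
      simp only [pvWeave, if_neg hx]
      rw [← this]
      simp

-- With no element exceeding m, the weave appends sl at the end.
theorem pv_weave_all_le (m : Int) (sl : List Int) (xs : List Int) (h : ∀ x ∈ xs, ¬ m < x) :
    pvWeave m sl xs = xs ++ sl := by
  induction xs with
  | nil => simp [pvWeave]
  | cons x t ih =>
    have hx := h x (by simp)
    simp only [pvWeave, if_neg hx]
    rw [ih (fun y hy => h y (by simp [hy]))]
    rfl

-- Once placed, B's loop just copies the rest.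
theorem pv_B_placed (m : Int) (sl : List Int) (xs out : List Int) :
    xs.foldl
      (fun (p : List Int × Bool) v =>
        if !p.2 && decide (m < v) then (p.1 ++ sl ++ [v], true) else (p.1 ++ [v], p.2))
      (out, true) = (out ++ xs, true) := by
  induction xs generalizing out with
  | nil => simp
  | cons x t ih =>
    rw [List.foldl_cons]
    have h : (if !(out, true).2 && decide (m < x)
          then ((out, true).1 ++ sl ++ [x], true)
          else ((out, true).1 ++ [x], (out, true).2)) = (out ++ [x], true) := by simp
    rw [h, ih]
    simp

-- B's loop + final extend computes the weave.
theorem pv_B_weave (m : Int) (sl : List Int) (xs out : List Int) :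
    (let st := xs.foldl
      (fun (p : List Int × Bool) v =>
        if !p.2 && decide (m < v) then (p.1 ++ sl ++ [v], true) else (p.1 ++ [v], p.2))
      (out, false)
     if st.2 then st.1 else st.1 ++ sl) = out ++ pvWeave m sl xs := by
  induction xs generalizing out with
  | nil => simp [pvWeave]
  | cons x t ih =>
    by_cases hx : m < x
    · simp only [List.foldl_cons, Bool.not_false, Bool.true_and, decide_eq_true_eq,
        pv_B_placed, pvWeave, if_pos hx]
      simp
    · simp only [List.foldl_cons, Bool.not_false, Bool.true_and, decide_eq_true_eq, if_neg hx,
        pvWeave]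
      rw [ih (out ++ [x])]
      simp

-- ===== VERDICT (by name: the statement is the Claim_ definition above) =====

theorem put_in_spec : Claim_equal_put_in := by
  intro ll sl _ hpre
  obtain ⟨hll, hsl⟩ := hpre
  unfold Spec_put_in put_in put_in_alt
  obtain ⟨m, hm⟩ : ∃ m, PySem.List.min? sl (fun x => x) = some m := by
    cases hmin : PySem.List.min? sl (fun x => x) with
    | none => exact absurd ((PySem.List.min?_eq_none_iff _ _).mp hmin) hsl
    | some m => exact ⟨m, rfl⟩
  obtain ⟨M, hM⟩ : ∃ M, PySem.List.max? ll (fun x => x) = some M := by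
    cases hmax : PySem.List.max? ll (fun x => x) with
    | none => exact absurd ((PySem.List.max?_eq_none_iff _ _).mp hmax) hll
    | some M => exact ⟨M, rfl⟩
  rw [hm, hM]
  have hB := pv_B_weave m sl ll []
  rw [List.nil_append] at hB
  have hA : (if m ≥ M then ll ++ sl
      else sl.reverse.foldl
        (fun acc num => PySem.List.insert acc ((putInScan m ll 0 : Nat) : Int) num) ll)
      = pvWeave m sl ll := by
    by_cases hge : m ≥ M
    · rw [if_pos hge, pv_weave_all_le m sl ll
        (fun x hx => not_lt.mpr (le_trans (PySem.List.max?_isMax hM x hx) hge))]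
    · have hex : ∃ x ∈ ll, m < x := ⟨M, PySem.List.max?_mem hM, not_le.mp hge⟩
      rw [if_neg hge]
      exact pv_A_weave m sl ll hex
  exact hA.trans hB.symm
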